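-- pv_equiv track=rewrite | github.com/Thushar18/Python-Assignment-Solutions | 4_Arrays/17_contain_elements.py | contain_elements
-- ===== SOURCE A (Python) =====
-- def contain_elements(arr):
--     is_12 = False
--     is_23 = False
--     for i in range(len(arr)):
--         if(arr[i] == 12):
--             is_12 = True
--         elif(arr[i] == 23):
--             is_23 = True
--     if is_12 and is_23:
--         return True
--     else:
--         return False
-- ===== SOURCE B (Python) =====
-- def contain_elements(arr):
--     return 12 in arr and 23 in arr
-- ===== Notes on version B (the rewrite author's own statement) =====
-- stated objective: idiomatic
-- what changed: Replaced the index loop maintaining two boolean flags with two short-circuiting membership tests (12 in arr and 23 in arr).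
import Mathlib
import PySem

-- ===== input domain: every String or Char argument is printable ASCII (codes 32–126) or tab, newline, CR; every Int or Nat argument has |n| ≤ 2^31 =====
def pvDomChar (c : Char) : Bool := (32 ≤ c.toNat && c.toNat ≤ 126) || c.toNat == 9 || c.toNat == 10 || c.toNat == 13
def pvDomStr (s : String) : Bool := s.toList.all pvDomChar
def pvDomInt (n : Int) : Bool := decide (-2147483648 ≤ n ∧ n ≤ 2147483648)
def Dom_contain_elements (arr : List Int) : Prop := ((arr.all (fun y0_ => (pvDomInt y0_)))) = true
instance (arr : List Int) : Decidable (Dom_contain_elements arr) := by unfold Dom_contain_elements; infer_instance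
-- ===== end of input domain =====

set_option maxRecDepth 4000


-- B replaces A's flag-setting index loop with two membership tests (idiomatic; same O(n) cost).

-- ===== PORT A =====
-- literal transliteration: index loop over range(len(arr)) updating the two flags
def contain_elements (arr : List Int) : Bool :=
  let st := (List.range arr.length).foldl
    (fun (s : Bool × Bool) (i : Nat) =>
      let x := (PySem.List.pyGet? arr (i : Int)).getD 0
      if x == 12 then (true, s.2)
      else if x == 23 then (s.1, true)
      else s)
    (false, false)
  if st.1 && st.2 then true else false

-- ===== PORT B =====
def contain_elements_alt (arr : List Int) : Bool :=
  arr.contains 12 && arr.contains 23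

-- ===== PRECONDITION & SPEC =====
def Spec_contain_elements (arr : List Int) (out : Bool) : Prop := out = contain_elements_alt arr
instance (arr : List Int) (out : Bool) : Decidable (Spec_contain_elements arr out) := by unfold Spec_contain_elements; infer_instance

-- ===== CLAIM (what is proved, stated in full; the proofs are below) =====
def Claim_equal_contain_elements : Prop := ∀ (arr : List Int), Dom_contain_elements arr → Spec_contain_elements arr (contain_elements arr)

-- ===== LEMMAS AND PROOFS =====

-- the flag update as a function of the element
def pvStep (s : Bool × Bool) (x : Int) : Bool × Bool :=
  if x == 12 then (true, s.2) else if x == 23 then (s.1, true) else s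

-- the index fold of port A equals a fold over the elements
theorem pvIndexFold_eq (l : List Int) (s : Bool × Bool) :
    (List.range l.length).foldl
      (fun (s : Bool × Bool) (i : Nat) => pvStep s ((PySem.List.pyGet? l (i : Int)).getD 0)) s
    = l.foldl pvStep s := by
  have h : (List.range l.length).map (fun (i : Nat) => (PySem.List.pyGet? l (i : Int)).getD 0) = l := by
    apply List.ext_getElem
    · simp
    · intro i h1 h2
      simp only [List.getElem_map, List.getElem_range, PySem.List.pyGet?_natCast]
      simp [List.getElem?_eq_getElem h2]
  conv_rhs => rw [← h]
  rw [List.foldl_map]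

-- the element fold computes the two membership flags
theorem pvFold_flags (l : List Int) (s1 s2 : Bool) :
    l.foldl pvStep (s1, s2) = (s1 || l.contains 12, s2 || l.contains 23) := by
  induction l generalizing s1 s2 with
  | nil => simp
  | cons x xs ih =>
    simp only [List.foldl_cons, pvStep, List.contains_cons]
    split_ifs with h12 h23
    · rw [ih]
      rw [beq_iff_eq] at h12
      subst h12
      simp
    · rw [ih]
      rw [beq_iff_eq] at h23
      subst h23
      simp only [beq_iff_eq] at h12
      simp [h12]
    · rw [ih]
      simp only [beq_iff_eq] at h12 h23
      have e12 : ((12 : Int) == x) = false := by simpa using Ne.symm h12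
      have e23 : ((23 : Int) == x) = false := by simpa using Ne.symm h23
      simp [e12, e23]

-- ===== VERDICT (by name: the statement is the Claim_ definition above) =====
theorem contain_elements_spec : Claim_equal_contain_elements := by
  intro arr _
  unfold Spec_contain_elements contain_elements contain_elements_alt
  rw [show (fun (s : Bool × Bool) (i : Nat) =>
      let x := (PySem.List.pyGet? arr (i : Int)).getD 0
      if x == 12 then (true, s.2) else if x == 23 then (s.1, true) else s)
    = (fun (s : Bool × Bool) (i : Nat) => pvStep s ((PySem.List.pyGet? arr (i : Int)).getD 0)) from rfl]
  rw [pvIndexFold_eq, pvFold_flags]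
  simp
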